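-- pv_equiv track=rewrite | github.com/gonzalj3/rag-notebook | server/app/services/chunker.py | _split_exchange_pairs
-- ===== SOURCE A (Python) =====
-- def _split_exchange_pairs(text: str) -> list[str]:
--     """Split conversation into human-AI exchange pairs."""
--     lines = text.split("\n")
--     pairs = []
--     current_pair = []
--
--     for line in lines:
--         is_human_turn = line.startswith("Human:") or line.startswith("User:")
--         if is_human_turn and current_pair:
--             pairs.append("\n".join(current_pair))
--             current_pair = []
--         current_pair.append(line)
--
--     if current_pair:
--         pairs.append("\n".join(current_pair))
--
--     return pairs if pairs else [text]
-- ===== SOURCE B (Python) =====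
-- def _split_exchange_pairs(text: str) -> list[str]:
--     """Split conversation into human-AI exchange pairs (recursive grouping)."""
--     def is_human(line):
--         return line.startswith("Human:") or line.startswith("User:")
--
--     def go(head, tail):
--         i = 0
--         while i < len(tail) and not is_human(tail[i]):
--             i += 1
--         group = "\n".join([head] + tail[:i])
--         if i == len(tail):
--             return [group]
--         return [group] + go(tail[i], tail[i + 1:])
--
--     lines = text.split("\n")
--     return go(lines[0], lines[1:])
-- ===== Notes on version B (the rewrite author's own statement) =====
-- stated objective: alternative
-- what changed: Replaces A's single accumulator loop (pairs + current_pair state threaded through every line) with a recursive grouping: each group is head-line plus the takeWhile-run of non-human lines, recursing on the remaining suffix.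
import Mathlib
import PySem

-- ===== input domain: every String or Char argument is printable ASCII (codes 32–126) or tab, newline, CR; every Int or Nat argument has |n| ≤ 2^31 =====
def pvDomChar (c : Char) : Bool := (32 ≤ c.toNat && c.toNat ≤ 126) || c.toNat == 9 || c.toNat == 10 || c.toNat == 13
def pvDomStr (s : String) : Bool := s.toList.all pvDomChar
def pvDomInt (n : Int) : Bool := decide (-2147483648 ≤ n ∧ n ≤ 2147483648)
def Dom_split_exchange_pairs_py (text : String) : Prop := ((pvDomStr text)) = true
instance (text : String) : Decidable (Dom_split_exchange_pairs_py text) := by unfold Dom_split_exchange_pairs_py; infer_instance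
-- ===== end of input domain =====

-- B replaces A's accumulator loop with recursive grouping (head + takeWhile of non-human lines,
-- recurse on the rest); same O(n) cost, different decomposition.

-- ===== PORT A =====
def split_exchange_pairs_py (text : String) : List String :=
  let lines := (PySem.Str.split? text "\n").getD []   -- sep "\n" ≠ "", so split? is some
  let st := lines.foldl (fun (st : List String × List String) line =>
    let is_human_turn := PySem.Str.startswith line "Human:" || PySem.Str.startswith line "User:"
    if is_human_turn && !st.2.isEmpty then
      (st.1 ++ [PySem.Str.join "\n" st.2], [line])
    else
      (st.1, st.2 ++ [line])) ([], [])
  let pairs := if st.2.isEmpty then st.1 else st.1 ++ [PySem.Str.join "\n" st.2]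
  if pairs.isEmpty then [text] else pairs

-- ===== PORT B =====
def altIsHuman (line : String) : Bool :=
  PySem.Str.startswith line "Human:" || PySem.Str.startswith line "User:"

-- go(head, tail): the while loop scans the longest prefix of tail of non-human lines
-- (List.takeWhile / List.dropWhile), joins it behind head, then recurses on the rest.
def altGo (head : String) (tail : List String) : List String :=
  let group := PySem.Str.join "\n" (head :: tail.takeWhile (fun l => !altIsHuman l))
  match hrest : tail.dropWhile (fun l => !altIsHuman l) with
  | [] => [group]
  | h :: t => group :: altGo h t
termination_by tail.length
decreasing_by
  have h1 := List.length_dropWhile_le (fun l => !altIsHuman l) tail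
  rw [hrest] at h1
  simp at h1
  omega

def split_exchange_pairs_py_alt (text : String) : List String :=
  match (PySem.Str.split? text "\n").getD [] with
  | [] => []      -- unreachable: split with a nonempty separator never yields []
  | h :: t => altGo h t

-- ===== PRECONDITION & SPEC =====
def Spec_split_exchange_pairs_py (text : String) (out : List String) : Prop := out = split_exchange_pairs_py_alt text
instance (text : String) (out : List String) : Decidable (Spec_split_exchange_pairs_py text out) := by unfold Spec_split_exchange_pairs_py; infer_instance

-- ===== CLAIM (what is proved, stated in full; the proofs are below) =====
def Claim_equal_split_exchange_pairs_py : Prop := ∀ (text : String), Dom_split_exchange_pairs_py text → Spec_split_exchange_pairs_py text (split_exchange_pairs_py text)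

-- ===== LEMMAS AND PROOFS =====

-- A's loop body, as a named step function (for the proofs only).
def aStep (st : List String × List String) (line : String) : List String × List String :=
  let is_human_turn := PySem.Str.startswith line "Human:" || PySem.Str.startswith line "User:"
  if is_human_turn && !st.2.isEmpty then
    (st.1 ++ [PySem.Str.join "\n" st.2], [line])
  else
    (st.1, st.2 ++ [line])

-- A's loop rephrased as direct recursion with a nonempty current group.
def aGo (cur : List String) (lines : List String) : List String :=
  match lines with
  | [] => [PySem.Str.join "\n" cur]
  | l :: ls => if altIsHuman l then PySem.Str.join "\n" cur :: aGo [l] ls else aGo (cur ++ [l]) ls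

theorem fold_eq_aGo (lines : List String) : ∀ (pairs cur : List String), cur ≠ [] →
    (let st := lines.foldl aStep (pairs, cur)
     if st.2.isEmpty then st.1 else st.1 ++ [PySem.Str.join "\n" st.2]) = pairs ++ aGo cur lines := by
  induction lines with
  | nil => intro pairs cur hc; simp [aGo, List.isEmpty_iff, hc]
  | cons l ls ih =>
    intro pairs cur hc
    simp only [List.foldl_cons, aGo]
    by_cases h : altIsHuman l = true
    · have : aStep (pairs, cur) l = (pairs ++ [PySem.Str.join "\n" cur], [l]) := by
        simp [aStep, altIsHuman] at h ⊢
        simp [hc, h]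
      rw [this, ih _ [l] (by simp)]
      simp [h, List.append_assoc]
    · have : aStep (pairs, cur) l = (pairs, cur ++ [l]) := by
        simp [aStep, altIsHuman] at h ⊢
        intro hor
        rcases hor with h1 | h1 <;> simp [h1] at h
      rw [this, ih _ (cur ++ [l]) (by simp)]
      simp [h]

theorem altGo_eq (h : String) (t : List String) :
    altGo h t =
      PySem.Str.join "\n" (h :: t.takeWhile (fun l => !altIsHuman l)) ::
        (match t.dropWhile (fun l => !altIsHuman l) with
         | [] => []
         | h' :: t' => altGo h' t') := by
  rw [altGo]
  split <;> rename_i heq <;> simp [heq]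

theorem altGo_ne_nil (h : String) (t : List String) : altGo h t ≠ [] := by
  rw [altGo_eq]; simp

theorem aGo_eq_altGo (lines : List String) : ∀ (cur : List String),
    aGo cur lines =
      PySem.Str.join "\n" (cur ++ lines.takeWhile (fun l => !altIsHuman l)) ::
        (match lines.dropWhile (fun l => !altIsHuman l) with
         | [] => []
         | h :: t => altGo h t) := by
  induction lines with
  | nil => intro cur; simp [aGo]
  | cons l ls ih =>
    intro cur
    by_cases h : altIsHuman l = true
    · have e1 : List.takeWhile (fun l => !altIsHuman l) (l :: ls) = [] := by simp [h]
      have e2 : List.dropWhile (fun l => !altIsHuman l) (l :: ls) = l :: ls := by simp [h]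
      rw [e1, e2]
      simp only [aGo, h, reduceIte, List.append_nil]
      rw [ih [l]]
      simp only [List.singleton_append]
      rw [← altGo_eq]
    · have e1 : List.takeWhile (fun l => !altIsHuman l) (l :: ls) = l :: List.takeWhile (fun l => !altIsHuman l) ls := by simp [h]
      have e2 : List.dropWhile (fun l => !altIsHuman l) (l :: ls) = List.dropWhile (fun l => !altIsHuman l) ls := by simp [h]
      rw [e1, e2]
      simp only [aGo, h, Bool.false_eq_true, reduceIte]
      rw [ih (cur ++ [l])]
      simp [List.append_assoc]

theorem splitOn_go_ne_nil (sep : List Char) (fuel : Nat) :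
    ∀ (l cur : List Char) (acc : List (List Char)), PySem.Chars.splitOn.go sep fuel l cur acc ≠ [] := by
  induction fuel with
  | zero => intro l cur acc; simp [PySem.Chars.splitOn.go]
  | succ n ih =>
    intro l cur acc
    cases l with
    | nil => simp [PySem.Chars.splitOn.go]
    | cons c rest =>
      rw [PySem.Chars.splitOn.go]
      split
      · exact ih _ _ _
      · exact ih _ _ _

theorem split_getD_ne_nil (text : String) : (PySem.Str.split? text "\n").getD [] ≠ [] := by
  have hmap := PySem.Str.split?_map text "\n"
  have hsep : ("\n".toList.isEmpty) = false := by decide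
  rw [PySem.Chars.split?, hsep] at hmap
  simp only [Bool.false_eq_true, reduceIte] at hmap
  cases hopt : PySem.Str.split? text "\n" with
  | none => rw [hopt] at hmap; simp at hmap
  | some xs =>
    rw [hopt] at hmap
    simp only [Option.map_some, Option.some.injEq] at hmap
    intro hxs
    simp only [Option.getD_some] at hxs
    subst hxs
    simp only [List.map_nil] at hmap
    exact splitOn_go_ne_nil _ _ _ _ _ hmap.symm

-- ===== VERDICT (by name: the statement is the Claim_ definition above) =====
theorem split_exchange_pairs_py_spec : Claim_equal_split_exchange_pairs_py := by
  intro text _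
  unfold Spec_split_exchange_pairs_py split_exchange_pairs_py split_exchange_pairs_py_alt
  cases hl : (PySem.Str.split? text "\n").getD [] with
  | nil => exact absurd hl (split_getD_ne_nil text)
  | cons h t =>
    have hfirst : aStep ([], []) h = ([], [h]) := by
      simp [aStep]
    have hfold : (h :: t).foldl aStep ([], []) = t.foldl aStep ([], [h]) := by
      simp [List.foldl_cons, hfirst]
    have heq := fold_eq_aGo t [] [h] (by simp)
    simp only at heq
    have : (let st := (h :: t).foldl aStep ([], ([] : List String))
            if st.2.isEmpty then st.1 else st.1 ++ [PySem.Str.join "\n" st.2]) = aGo [h] t := by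
      rw [hfold]; simpa using heq
    show (let st := (h :: t).foldl aStep ([], [])
          let pairs := if st.2.isEmpty then st.1 else st.1 ++ [PySem.Str.join "\n" st.2]
          if pairs.isEmpty then [text] else pairs) = altGo h t
    simp only [this]
    have he : aGo [h] t = altGo h t := by
      rw [aGo_eq_altGo t [h]]
      simp only [List.singleton_append]
      rw [← altGo_eq]
    rw [he]
    simp [List.isEmpty_iff, altGo_ne_nil]
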